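-- pv_equiv track=rewrite | github.com/nickvusko/Advent_of_Code_2021 | advent_code_6.12.py | let_them_multiply
-- ===== SOURCE A (Python) =====
-- def let_them_multiply(herd:list, days:int)->dict:
--     dict_herd = {x:0 for x in range(0,9)}
--     for fish in herd:
--         if fish in dict_herd:
--             dict_herd[fish] +=1
--     for day in range(0, days):
--         dict_herd = fish_age(dict_herd)
--     return dict_herd
--
-- def fish_age(herd:dict)->dict:
--     new_herd = {x:0 for x in range(0,9)}
--     for i in herd.keys():
--         if i !=0:
--             new_herd[i-1]=herd[i]
--     new_herd[6]=herd[0]+herd[7]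
--     new_herd[8]=herd[0]
--     return new_herd
-- ===== SOURCE B (Python) =====
-- def let_them_multiply(herd: list, days: int) -> dict:
--     counts = [0] * 9
--     for fish in herd:
--         if 0 <= fish <= 8:
--             counts[fish] += 1
--     # 9x9 one-day transition matrix: next[r] = sum_c M[r][c] * cur[c]
--     M = [[1 if (c == r + 1) or (c == 0 and r in (6, 8)) else 0 for c in range(9)]
--          for r in range(9)]
--     # R = M ** max(days, 0) by binary exponentiation
--     R = [[1 if r == c else 0 for c in range(9)] for r in range(9)]
--     n = max(days, 0)
--     while n:
--         if n % 2 == 1: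
--             R = _matmul(R, M)
--         M = _matmul(M, M)
--         n //= 2
--     v = _matvec(R, counts)
--     return {i: v[i] for i in range(9)}
--
--
-- def _matmul(A, B):
--     return [[sum(A[r][k] * B[k][c] for k in range(9)) for c in range(9)]
--             for r in range(9)]
--
--
-- def _matvec(A, v):
--     return [sum(A[r][c] * v[c] for c in range(9)) for r in range(9)]
-- ===== Notes on version B (the rewrite author's own statement) =====
-- stated objective: alternative
-- what changed: Replaces the day-by-day simulation (one fish_age dict pass per day) by binary exponentiation of the 9x9 one-day transition matrix applied to the initial timer-count vector.
import Mathlib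
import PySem

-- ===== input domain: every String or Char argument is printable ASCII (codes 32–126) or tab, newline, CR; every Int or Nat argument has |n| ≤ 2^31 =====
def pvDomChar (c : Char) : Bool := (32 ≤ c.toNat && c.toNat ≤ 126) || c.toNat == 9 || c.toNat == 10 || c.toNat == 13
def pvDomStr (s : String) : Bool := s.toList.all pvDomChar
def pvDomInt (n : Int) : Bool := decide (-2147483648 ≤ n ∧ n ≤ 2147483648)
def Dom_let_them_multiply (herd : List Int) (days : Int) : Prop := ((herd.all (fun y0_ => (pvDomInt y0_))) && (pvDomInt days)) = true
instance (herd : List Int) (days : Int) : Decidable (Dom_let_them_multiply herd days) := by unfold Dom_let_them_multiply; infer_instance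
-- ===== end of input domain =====

-- B replaces A's day-by-day simulation of the nine lanternfish-timer counters by binary
-- exponentiation of the 9x9 one-day transition matrix (objective: alternative algorithm).

-- ===== PORT A =====
-- fish_age: every access herd[i] / herd[0] / herd[7] in A happens with the key present
-- (the dict passed in always carries exactly the keys 0..8), so Dict.getD 0 is exact here.
def fish_age (herd : PySem.Dict Int Int) : PySem.Dict Int Int :=
  let new0 := (PySem.List.pyRange 0 9 1).foldl (fun d x => d.insert x 0) PySem.Dict.empty
  let new1 := herd.keys.foldl (fun d i => if i ≠ 0 then d.insert (i - 1) (herd.getD i 0) else d) new0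
  let new2 := new1.insert 6 (herd.getD 0 0 + herd.getD 7 0)
  new2.insert 8 (herd.getD 0 0)

def let_them_multiply (herd : List Int) (days : Int) : List (Int × Int) :=
  let d0 := (PySem.List.pyRange 0 9 1).foldl (fun d x => d.insert x 0) PySem.Dict.empty
  -- dict_herd[fish] += 1 only runs when fish is a key, so modify with default 0 is exact
  let d1 := herd.foldl (fun d fish => if d.contains fish then d.modify fish 0 (· + 1) else d) d0
  let d2 := (PySem.List.pyRange 0 days 1).foldl (fun d _ => fish_age d) d1
  d2.items

-- ===== PORT B =====
def matmul9 (A B : List (List Int)) : List (List Int) :=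
  (PySem.List.pyRange 0 9 1).map (fun r =>
    (PySem.List.pyRange 0 9 1).map (fun c =>
      ((PySem.List.pyRange 0 9 1).map (fun k =>
        PySem.List.pyGetD (PySem.List.pyGetD A r []) k 0 *
        PySem.List.pyGetD (PySem.List.pyGetD B k []) c 0)).sum))

def matvec9 (A : List (List Int)) (v : List Int) : List Int :=
  (PySem.List.pyRange 0 9 1).map (fun r =>
    ((PySem.List.pyRange 0 9 1).map (fun c =>
      PySem.List.pyGetD (PySem.List.pyGetD A r []) c 0 * PySem.List.pyGetD v c 0)).sum)

-- the while-loop of Source B on the state (R, M, n)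
def powLoop (R M : List (List Int)) (n : Nat) : List (List Int) :=
  if n = 0 then R
  else powLoop (if n % 2 = 1 then matmul9 R M else R) (matmul9 M M) (n / 2)
  termination_by n
  decreasing_by omega

def let_them_multiply_alt (herd : List Int) (days : Int) : List (Int × Int) :=
  -- counts[fish] += 1 under the guard 0 <= fish <= 8 on a length-9 list: set/getD exact
  let counts := herd.foldl (fun cs fish =>
    if 0 ≤ fish ∧ fish ≤ 8 then cs.set fish.toNat (cs.getD fish.toNat 0 + 1) else cs)
    [0, 0, 0, 0, 0, 0, 0, 0, 0]
  let M := (PySem.List.pyRange 0 9 1).map (fun r =>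
    (PySem.List.pyRange 0 9 1).map (fun c =>
      if c = r + 1 ∨ (c = 0 ∧ (r = 6 ∨ r = 8)) then (1 : Int) else 0))
  let I := (PySem.List.pyRange 0 9 1).map (fun r =>
    (PySem.List.pyRange 0 9 1).map (fun c => if r = c then (1 : Int) else 0))
  let R := powLoop I M (max days 0).toNat
  let v := matvec9 R counts
  ((PySem.List.pyRange 0 9 1).foldl (fun d i => d.insert i (PySem.List.pyGetD v i 0))
    PySem.Dict.empty).items

-- ===== PRECONDITION & SPEC =====
def Spec_let_them_multiply (herd : List Int) (days : Int) (out : List (Int × Int)) : Prop := out = let_them_multiply_alt herd days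
instance (herd : List Int) (days : Int) (out : List (Int × Int)) : Decidable (Spec_let_them_multiply herd days out) := by unfold Spec_let_them_multiply; infer_instance

-- ===== CLAIM (what is proved, stated in full; the proofs are below) =====
def Claim_equal_let_them_multiply : Prop := ∀ (herd : List Int) (days : Int), Dom_let_them_multiply herd days → Spec_let_them_multiply herd days (let_them_multiply herd days)

-- ===== LEMMAS AND PROOFS =====

-- the abstract state: the nine timer counters both programs maintain
structure V9 where
  c0 : Int
  c1 : Int
  c2 : Int
  c3 : Int
  c4 : Int
  c5 : Int
  c6 : Int
  c7 : Int
  c8 : Int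
deriving DecidableEq, Repr

def zero9 : V9 := ⟨0, 0, 0, 0, 0, 0, 0, 0, 0⟩

def stepV (t : V9) : V9 := ⟨t.c1, t.c2, t.c3, t.c4, t.c5, t.c6, t.c0 + t.c7, t.c8, t.c0⟩

def bumpV (t : V9) (fish : Int) : V9 :=
  if fish = 0 then { t with c0 := t.c0 + 1 }
  else if fish = 1 then { t with c1 := t.c1 + 1 }
  else if fish = 2 then { t with c2 := t.c2 + 1 }
  else if fish = 3 then { t with c3 := t.c3 + 1 }
  else if fish = 4 then { t with c4 := t.c4 + 1 }
  else if fish = 5 then { t with c5 := t.c5 + 1 }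
  else if fish = 6 then { t with c6 := t.c6 + 1 }
  else if fish = 7 then { t with c7 := t.c7 + 1 }
  else if fish = 8 then { t with c8 := t.c8 + 1 }
  else t

def dict9 (t : V9) : PySem.Dict Int Int :=
  PySem.Dict.mk [(0, t.c0), (1, t.c1), (2, t.c2), (3, t.c3), (4, t.c4), (5, t.c5), (6, t.c6), (7, t.c7), (8, t.c8)]

def vec9 (t : V9) : List Int := [t.c0, t.c1, t.c2, t.c3, t.c4, t.c5, t.c6, t.c7, t.c8]

lemma pyRange9 : PySem.List.pyRange 0 9 1 = [0, 1, 2, 3, 4, 5, 6, 7, 8] := by decide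

-- ---------- A side ----------

lemma bump_dict (t : V9) (fish : Int) :
    (if (dict9 t).contains fish then (dict9 t).modify fish 0 (· + 1) else dict9 t)
      = dict9 (bumpV t fish) := by
  by_cases h : 0 ≤ fish ∧ fish ≤ 8
  · obtain ⟨h1, h2⟩ := h
    interval_cases fish <;>
      simp [dict9, bumpV, PySem.Dict.contains, PySem.Dict.modify, PySem.Dict.get?,
        PySem.Dict.getD, PySem.Dict.insert]
  · have hc : (dict9 t).contains fish = false := by
      simp only [dict9, PySem.Dict.contains, List.any_cons, List.any_nil, Bool.or_false,
        Bool.or_eq_false_iff, beq_eq_false_iff_ne, ne_eq]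
      omega
    rw [hc]
    simp only [Bool.false_eq_true, if_false, bumpV]
    split_ifs <;> first | rfl | omega

lemma fish_age_dict (t : V9) : fish_age (dict9 t) = dict9 (stepV t) := by
  simp [fish_age, dict9, stepV, PySem.Dict.insert, PySem.Dict.contains, PySem.Dict.getD,
    PySem.Dict.get?, PySem.Dict.keys, PySem.Dict.empty, pyRange9]

lemma foldl_const_iter {α β : Type} (f : α → α) (l : List β) (init : α) :
    l.foldl (fun s _ => f s) init = f^[l.length] init := by
  induction l generalizing init with
  | nil => rfl
  | cons x xs ih => simp [ih, Function.iterate_succ_apply]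

lemma count_loop_dict (herd : List Int) (t : V9) :
    herd.foldl (fun d fish => if d.contains fish then d.modify fish 0 (· + 1) else d) (dict9 t)
      = dict9 (herd.foldl bumpV t) := by
  induction herd generalizing t with
  | nil => rfl
  | cons x xs ih => simp only [List.foldl_cons, bump_dict, ih]

lemma iter_fish_age (n : Nat) (t : V9) : fish_age^[n] (dict9 t) = dict9 (stepV^[n] t) := by
  induction n generalizing t with
  | zero => rfl
  | succ m ih => simp [Function.iterate_succ_apply, fish_age_dict, ih]

lemma A_char (herd : List Int) (days : Int) :
    let_them_multiply herd days = (dict9 (stepV^[days.toNat] (herd.foldl bumpV zero9))).items := by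
  show ((PySem.List.pyRange 0 days 1).foldl (fun d _ => fish_age d)
      (herd.foldl (fun d fish => if d.contains fish then d.modify fish 0 (· + 1) else d)
        ((PySem.List.pyRange 0 9 1).foldl (fun d x => d.insert x 0) PySem.Dict.empty))).items = _
  rw [show (PySem.List.pyRange 0 9 1).foldl (fun d x => d.insert x 0) PySem.Dict.empty
      = dict9 zero9 from by decide]
  rw [count_loop_dict, foldl_const_iter, PySem.List.length_pyRange_one]
  rw [show days - 0 = days from by ring, iter_fish_age]

-- ---------- B side ----------

lemma bump_vec (t : V9) (fish : Int) :
    (if 0 ≤ fish ∧ fish ≤ 8 then (vec9 t).set fish.toNat ((vec9 t).getD fish.toNat 0 + 1) else vec9 t)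
      = vec9 (bumpV t fish) := by
  by_cases h : 0 ≤ fish ∧ fish ≤ 8
  · obtain ⟨h1, h2⟩ := h
    rw [if_pos ⟨h1, h2⟩]
    interval_cases fish <;> simp [vec9, bumpV]
  · rw [if_neg h]
    simp only [bumpV]
    split_ifs <;> first | rfl | omega

lemma count_loop_vec (herd : List Int) (t : V9) :
    herd.foldl (fun cs fish =>
        if 0 ≤ fish ∧ fish ≤ 8 then cs.set fish.toNat (cs.getD fish.toNat 0 + 1) else cs) (vec9 t)
      = vec9 (herd.foldl bumpV t) := by
  induction herd generalizing t with
  | nil => rfl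
  | cons x xs ih => simp only [List.foldl_cons, bump_vec, ih]

lemma sum_map_pyRange_eq (f : Int → Int) (n : Nat) :
    ((PySem.List.pyRange 0 (n : Int) 1).map f).sum = ∑ k ∈ Finset.range n, f (k : Int) := by
  rw [PySem.List.pyRange_zero_nat, List.map_map]
  rfl

lemma matvec_matmul (A B : List (List Int)) (v : List Int) :
    matvec9 (matmul9 A B) v = matvec9 A (matvec9 B v) := by
  unfold matvec9
  apply List.map_congr_left
  intro r hr
  obtain ⟨hr0, hr9⟩ := (PySem.List.mem_pyRange_one).mp hr
  rw [show matmul9 A B = (PySem.List.pyRange 0 9 1).map (fun r =>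
      (PySem.List.pyRange 0 9 1).map (fun c =>
        ((PySem.List.pyRange 0 9 1).map (fun k =>
          PySem.List.pyGetD (PySem.List.pyGetD A r []) k 0 *
          PySem.List.pyGetD (PySem.List.pyGetD B k []) c 0)).sum)) from rfl]
  rw [PySem.List.pyGetD_map_pyRange_of_nonneg _ 9 r _ hr0 hr9]
  have hcongr : ∀ c, c ∈ PySem.List.pyRange 0 9 1 →
      PySem.List.pyGetD ((PySem.List.pyRange 0 9 1).map (fun c =>
          ((PySem.List.pyRange 0 9 1).map (fun k =>
            PySem.List.pyGetD (PySem.List.pyGetD A r []) k 0 *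
            PySem.List.pyGetD (PySem.List.pyGetD B k []) c 0)).sum)) c 0 * PySem.List.pyGetD v c 0
        = ((PySem.List.pyRange 0 9 1).map (fun k =>
            PySem.List.pyGetD (PySem.List.pyGetD A r []) k 0 *
            PySem.List.pyGetD (PySem.List.pyGetD B k []) c 0)).sum * PySem.List.pyGetD v c 0 := by
    intro c hc
    obtain ⟨hc0, hc9⟩ := (PySem.List.mem_pyRange_one).mp hc
    rw [PySem.List.pyGetD_map_pyRange_of_nonneg _ 9 c _ hc0 hc9]
  rw [List.map_congr_left hcongr]
  have hcongr2 : ∀ k, k ∈ PySem.List.pyRange 0 9 1 →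
      PySem.List.pyGetD (PySem.List.pyGetD A r []) k 0 *
        PySem.List.pyGetD ((PySem.List.pyRange 0 9 1).map (fun k =>
          ((PySem.List.pyRange 0 9 1).map (fun c =>
            PySem.List.pyGetD (PySem.List.pyGetD B k []) c 0 * PySem.List.pyGetD v c 0)).sum)) k 0
      = PySem.List.pyGetD (PySem.List.pyGetD A r []) k 0 *
        ((PySem.List.pyRange 0 9 1).map (fun c =>
          PySem.List.pyGetD (PySem.List.pyGetD B k []) c 0 * PySem.List.pyGetD v c 0)).sum := by
    intro k hk
    obtain ⟨hk0, hk9⟩ := (PySem.List.mem_pyRange_one).mp hk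
    rw [PySem.List.pyGetD_map_pyRange_of_nonneg _ 9 k _ hk0 hk9]
  rw [List.map_congr_left hcongr2]
  rw [show (9:Int) = ((9:Nat):Int) from rfl]
  simp only [sum_map_pyRange_eq]
  simp only [Finset.sum_mul, Finset.mul_sum]
  rw [Finset.sum_comm]
  exact Finset.sum_congr rfl fun k _ => Finset.sum_congr rfl fun c _ => by ring

def pvM : List (List Int) :=
  (PySem.List.pyRange 0 9 1).map (fun r =>
    (PySem.List.pyRange 0 9 1).map (fun c =>
      if c = r + 1 ∨ (c = 0 ∧ (r = 6 ∨ r = 8)) then (1 : Int) else 0))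

def pvI : List (List Int) :=
  (PySem.List.pyRange 0 9 1).map (fun r =>
    (PySem.List.pyRange 0 9 1).map (fun c => if r = c then (1 : Int) else 0))

lemma matvec_M (t : V9) : matvec9 pvM (vec9 t) = vec9 (stepV t) := by
  rw [show pvM = [[0,1,0,0,0,0,0,0,0],[0,0,1,0,0,0,0,0,0],[0,0,0,1,0,0,0,0,0],
    [0,0,0,0,1,0,0,0,0],[0,0,0,0,0,1,0,0,0],[0,0,0,0,0,0,1,0,0],
    [1,0,0,0,0,0,0,1,0],[0,0,0,0,0,0,0,0,1],[1,0,0,0,0,0,0,0,0]] from by decide]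
  simp [matvec9, pyRange9, vec9, stepV, PySem.List.pyGetD, PySem.List.pyGet?, PySem.List.pyIdx?]

lemma matvec_I (t : V9) : matvec9 pvI (vec9 t) = vec9 t := by
  rw [show pvI = [[1,0,0,0,0,0,0,0,0],[0,1,0,0,0,0,0,0,0],[0,0,1,0,0,0,0,0,0],
    [0,0,0,1,0,0,0,0,0],[0,0,0,0,1,0,0,0,0],[0,0,0,0,0,1,0,0,0],
    [0,0,0,0,0,0,1,0,0],[0,0,0,0,0,0,0,1,0],[0,0,0,0,0,0,0,0,1]] from by decide]
  simp [matvec9, pyRange9, vec9, PySem.List.pyGetD, PySem.List.pyGet?, PySem.List.pyIdx?]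

lemma iter_double (M : List (List Int)) (m : Nat) (v : List Int) :
    (fun w => matvec9 (matmul9 M M) w)^[m] v = (fun w => matvec9 M w)^[2 * m] v := by
  induction m generalizing v with
  | zero => rfl
  | succ k ih =>
    rw [Function.iterate_succ_apply, ih, matvec_matmul]
    rw [show 2 * (k + 1) = 2 * k + 1 + 1 from by omega]
    rw [Function.iterate_succ_apply, Function.iterate_succ_apply]

lemma powLoop_vec (n : Nat) (R M : List (List Int)) (v : List Int) :
    matvec9 (powLoop R M n) v = matvec9 R ((fun w => matvec9 M w)^[n] v) := by
  induction n using Nat.strong_induction_on generalizing R M v with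
  | _ n ih =>
    rw [powLoop]
    by_cases hn : n = 0
    · simp [hn]
    · rw [if_neg hn, ih (n / 2) (by omega), iter_double]
      by_cases ho : n % 2 = 1
      · rw [if_pos ho, matvec_matmul, ← Function.iterate_succ_apply' (fun w => matvec9 M w)]
        simp only [Nat.succ_eq_add_one]
        rw [show 2 * (n / 2) + 1 = n from by omega]
      · rw [if_neg ho, show 2 * (n / 2) = n from by omega]

lemma iter_stepM (n : Nat) (t : V9) :
    (fun w => matvec9 pvM w)^[n] (vec9 t) = vec9 (stepV^[n] t) := by
  induction n generalizing t with
  | zero => rfl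
  | succ m ih => simp [Function.iterate_succ_apply, matvec_M, ih]

lemma final_dict (t : V9) :
    ((PySem.List.pyRange 0 9 1).foldl (fun d i => d.insert i (PySem.List.pyGetD (vec9 t) i 0))
        PySem.Dict.empty).items = (dict9 t).items := by
  simp [pyRange9, vec9, dict9, PySem.Dict.insert, PySem.Dict.contains, PySem.Dict.empty,
    PySem.List.pyGetD, PySem.List.pyGet?, PySem.List.pyIdx?]

lemma B_char (herd : List Int) (days : Int) :
    let_them_multiply_alt herd days
      = (dict9 (stepV^[days.toNat] (herd.foldl bumpV zero9))).items := by
  show ((PySem.List.pyRange 0 9 1).foldl (fun d i => d.insert i (PySem.List.pyGetD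
      (matvec9 (powLoop pvI pvM (max days 0).toNat)
        (herd.foldl (fun cs fish =>
          if 0 ≤ fish ∧ fish ≤ 8 then cs.set fish.toNat (cs.getD fish.toNat 0 + 1) else cs)
          [0, 0, 0, 0, 0, 0, 0, 0, 0])) i 0)) PySem.Dict.empty).items = _
  rw [show ([0, 0, 0, 0, 0, 0, 0, 0, 0] : List Int) = vec9 zero9 from rfl]
  rw [count_loop_vec, powLoop_vec, show (max days 0).toNat = days.toNat from by omega,
    iter_stepM, matvec_I, final_dict]

-- ===== VERDICT (by name: the statement is the Claim_ definition above) =====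
theorem let_them_multiply_spec : Claim_equal_let_them_multiply := by
  intro herd days _
  unfold Spec_let_them_multiply
  rw [A_char, B_char]
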